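-- pv_equiv track=rewrite | github.com/aman2004sp/PQC-In-SCADA | Kyber_Scada_Prototype.py | matrix_vector_mul
-- ===== SOURCE A (Python) =====
-- from typing import List, Tuple, Dict
--
-- def poly_zero(n: int) -> List[int]:
--     """
--     Creates a zero polynomial of degree n.
--     """
--     return [0 for _ in range(n)]
--
-- def poly_add(a: List[int], b: List[int], q: int) -> List[int]:
--     """
--     Polynomial addition modulo q.
--     """
--     result = []
--     for i in range(len(a)):
--         result.append((a[i] + b[i]) % q)
--     return result
--
-- def poly_mul(a: List[int], b: List[int], q: int) -> List[int]:
--     """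
--     Naive polynomial multiplication modulo (x^n + 1) and q.
--     Intentionally unoptimized (O(n^2)).
--     """
--     n = len(a)
--     result = [0] * n
--
--     for i in range(n):
--         for j in range(n):
--             index = (i + j) % n
--             sign = -1 if (i + j) >= n else 1
--             result[index] += sign * a[i] * b[j]
--
--     for i in range(n):
--         result[i] %= q
--
--     return result
--
-- def matrix_vector_mul(
--     matrix: List[List[List[int]]],
--     vector: List[List[int]],
--     q: int
-- ) -> List[List[int]]:
--     """
--     Multiplies a polynomial matrix with a polynomial vector.
--     """
--     k = len(vector)
--     n = len(vector[0])
--     result = []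
--
--     for i in range(k):
--         acc = poly_zero(n)
--         for j in range(k):
--             product = poly_mul(matrix[i][j], vector[j], q)
--             acc = poly_add(acc, product, q)
--         result.append(acc)
--
--     return result
-- ===== SOURCE B (Python) =====
-- def _conv(a, b):
--     """Linear convolution (length 2n-1) of two equal-length lists by Karatsuba
--     divide-and-conquer: split at m = n//2, three recursive half-size products."""
--     n = len(a)
--     if n == 0:
--         return []
--     if n == 1:
--         return [a[0] * b[0]]
--     m = n // 2
--     a0, a1 = a[:m], a[m:]
--     b0, b1 = b[:m], b[m:]
--     z0 = _conv(a0, b0)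
--     z2 = _conv(a1, b1)
--     asum = [a1[t] + (a0[t] if t < m else 0) for t in range(n - m)]
--     bsum = [b1[t] + (b0[t] if t < m else 0) for t in range(n - m)]
--     z1 = _conv(asum, bsum)
--     res = [0] * (2 * n - 1)
--     for t in range(len(z0)):
--         res[t] += z0[t]
--         res[t + m] -= z0[t]
--     for t in range(len(z1)):
--         res[t + m] += z1[t]
--     for t in range(len(z2)):
--         res[t + m] -= z2[t]
--         res[t + 2 * m] += z2[t]
--     return res
--
-- def _negacyclic_mul(a, b, n):
--     """Product of a and b modulo x^n + 1 (no coefficient mod)."""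
--     c = _conv(a, b)
--     return [c[t] - (c[t + n] if t + n < 2 * n - 1 else 0) for t in range(n)]
--
-- def matrix_vector_mul(matrix, vector, q):
--     k = len(vector)
--     n = len(vector[0])
--     out = []
--     for i in range(k):
--         acc = [0] * n
--         for j in range(k):
--             prod = _negacyclic_mul(matrix[i][j], vector[j], n)
--             acc = [acc[t] + prod[t] for t in range(n)]
--         out.append([c % q for c in acc])
--     return out
-- ===== Notes on version B (the rewrite author's own statement) =====
-- stated objective: alternative
-- what changed: the per-entry polynomial product is computed by a recursive Karatsuba divide-and-conquer linear convolution (three half-size sub-products combined by shifts) followed by a negacyclic fold, with raw integer row accumulation and a single final mod per coefficient, instead of A's fused O(n^2) sign-conditional scatter with per-step mod; …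
-- outside the precondition, e.g. on matrix_vector_mul([[[4], [5, 6]], [[7], [8]]], [[1], [2, 3]], 5): A returns [[1], [3]], B returns [[4], [3]]; on matrix_vector_mul([[[]]], [[]], 0): A returns [[]], B returns [[]]
import Mathlib
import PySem

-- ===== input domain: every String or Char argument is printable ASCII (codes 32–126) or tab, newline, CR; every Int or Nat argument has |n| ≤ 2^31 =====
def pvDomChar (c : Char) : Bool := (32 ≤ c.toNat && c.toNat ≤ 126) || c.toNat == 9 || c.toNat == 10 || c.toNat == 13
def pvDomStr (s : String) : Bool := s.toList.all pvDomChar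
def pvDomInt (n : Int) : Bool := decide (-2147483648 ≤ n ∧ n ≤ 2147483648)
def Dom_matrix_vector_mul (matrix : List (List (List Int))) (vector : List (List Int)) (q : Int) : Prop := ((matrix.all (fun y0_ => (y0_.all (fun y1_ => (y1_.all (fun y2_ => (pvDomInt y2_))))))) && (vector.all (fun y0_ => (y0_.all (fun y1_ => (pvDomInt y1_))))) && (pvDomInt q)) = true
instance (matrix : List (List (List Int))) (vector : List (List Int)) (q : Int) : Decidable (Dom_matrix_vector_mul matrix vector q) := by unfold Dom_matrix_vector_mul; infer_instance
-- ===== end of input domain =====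

-- B replaces A's fused schoolbook negacyclic multiplication by a Karatsuba divide-and-conquer
-- linear convolution (three half-size recursive products) followed by a negacyclic fold, with raw
-- integer row accumulation and one final mod per coefficient (objective: alternative algorithm).

-- ===== PORT A =====
def poly_zero (n : Int) : List Int :=
  (PySem.List.pyRange 0 n 1).map (fun _ => (0 : Int))

def poly_add (a b : List Int) (q : Int) : List Int :=
  (PySem.List.pyRange 0 (PySem.List.len a) 1).foldl
    (fun result i =>
      result ++ [PySem.Int.mod (PySem.List.pyGetD a i 0 + PySem.List.pyGetD b i 0) q]) []

def poly_mul (a b : List Int) (q : Int) : List Int :=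
  let n := PySem.List.len a
  let result := PySem.List.pyRepeat [(0 : Int)] n
  let result := (PySem.List.pyRange 0 n 1).foldl (fun result i =>
    (PySem.List.pyRange 0 n 1).foldl (fun result j =>
      let index := PySem.Int.mod (i + j) n
      let sign : Int := if i + j ≥ n then -1 else 1
      PySem.List.pySetD result index
        (PySem.List.pyGetD result index 0 + sign * PySem.List.pyGetD a i 0 * PySem.List.pyGetD b j 0))
      result) result
  (PySem.List.pyRange 0 n 1).foldl (fun result i =>
    PySem.List.pySetD result i (PySem.Int.mod (PySem.List.pyGetD result i 0) q)) result

def matrix_vector_mul (matrix : List (List (List Int))) (vector : List (List Int)) (q : Int) : List (List Int) :=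
  let k := PySem.List.len vector
  let n := PySem.List.len (PySem.List.pyGetD vector 0 [])
  (PySem.List.pyRange 0 k 1).foldl (fun result i =>
    let acc := (PySem.List.pyRange 0 k 1).foldl (fun acc j =>
      let product := poly_mul (PySem.List.pyGetD (PySem.List.pyGetD matrix i []) j [])
        (PySem.List.pyGetD vector j []) q
      poly_add acc product q) (poly_zero n)
    result ++ [acc]) []

-- ===== PORT B =====
-- a[:m] / a[m:] with the natural number m = len(a)//2 are exactly List.take m / List.drop m.
def conv_kara (a b : List Int) : List Int :=
  if _h0 : a.length = 0 then []
  else if _h1 : a.length = 1 then [a.getD 0 0 * b.getD 0 0]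
  else
    let m := a.length / 2
    let z0 := conv_kara (a.take m) (b.take m)
    let z2 := conv_kara (a.drop m) (b.drop m)
    let asum := (List.range (a.length - m)).map
      (fun t => (a.drop m).getD t 0 + if t < m then (a.take m).getD t 0 else 0)
    let bsum := (List.range (a.length - m)).map
      (fun t => (b.drop m).getD t 0 + if t < m then (b.take m).getD t 0 else 0)
    let z1 := conv_kara asum bsum
    let res := List.replicate (2 * a.length - 1) (0 : Int)
    let res := (List.range z0.length).foldl (fun r t =>
      let r1 := r.set t (r.getD t 0 + z0.getD t 0)
      r1.set (t + m) (r1.getD (t + m) 0 - z0.getD t 0)) res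
    let res := (List.range z1.length).foldl (fun r t =>
      r.set (t + m) (r.getD (t + m) 0 + z1.getD t 0)) res
    (List.range z2.length).foldl (fun r t =>
      let r1 := r.set (t + m) (r.getD (t + m) 0 - z2.getD t 0)
      r1.set (t + 2 * m) (r1.getD (t + 2 * m) 0 + z2.getD t 0)) res
termination_by a.length
decreasing_by
  all_goals simp only [List.length_take, List.length_drop, List.length_map, List.length_range]
  all_goals omega

def poly_mul_kara (a b : List Int) (n : Int) : List Int :=
  let c := conv_kara a b
  (PySem.List.pyRange 0 n 1).map (fun t =>
    PySem.List.pyGetD c t 0 - (if t + n < 2 * n - 1 then PySem.List.pyGetD c (t + n) 0 else 0))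

def matrix_vector_mul_alt (matrix : List (List (List Int))) (vector : List (List Int)) (q : Int) : List (List Int) :=
  let k := PySem.List.len vector
  let n := PySem.List.len (PySem.List.pyGetD vector 0 [])
  (PySem.List.pyRange 0 k 1).foldl (fun out i =>
    let acc := (PySem.List.pyRange 0 k 1).foldl (fun acc j =>
      let prod := poly_mul_kara (PySem.List.pyGetD (PySem.List.pyGetD matrix i []) j [])
        (PySem.List.pyGetD vector j []) n
      (PySem.List.pyRange 0 n 1).map (fun t =>
        PySem.List.pyGetD acc t 0 + PySem.List.pyGetD prod t 0)) (PySem.List.pyRepeat [(0 : Int)] n)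
    out ++ [acc.map (fun c => PySem.Int.mod c q)]) []

-- ===== PRECONDITION & SPEC =====
-- Pre_ excludes an empty vector (A raises IndexError), q = 0 (A raises ZeroDivisionError except in
-- the degenerate all-empty case where q is never used), and ragged inputs whose accessed polynomials
-- do not all have length len(vector[0]) or whose matrix has fewer than len(vector) rows/columns:
-- ragged shapes are unspecified corners: there A either raises or returns a value computed with the
-- matrix entry's length as the ring degree, while B either raises or computes with mismatched lengths.
def Pre_matrix_vector_mul (matrix : List (List (List Int))) (vector : List (List Int)) (q : Int) : Prop :=
  q ≠ 0 ∧ vector ≠ [] ∧ vector.length ≤ matrix.length ∧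
  (∀ v ∈ vector, v.length = (vector.headD []).length) ∧
  (∀ row ∈ matrix.take vector.length, vector.length ≤ row.length ∧
     ∀ p ∈ row.take vector.length, p.length = (vector.headD []).length)
instance (matrix : List (List (List Int))) (vector : List (List Int)) (q : Int) : Decidable (Pre_matrix_vector_mul matrix vector q) := by unfold Pre_matrix_vector_mul; infer_instance

def pvWitness_matrix_vector_mul : List (List (List Int)) × List (List Int) × Int :=
  ([[[1, 2], [3, 4]], [[0, 1], [2, 0]]], [[1, 1], [2, 3]], 17)

def Spec_matrix_vector_mul (matrix : List (List (List Int))) (vector : List (List Int)) (q : Int) (out : List (List Int)) : Prop := out = matrix_vector_mul_alt matrix vector q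
instance (matrix : List (List (List Int))) (vector : List (List Int)) (q : Int) (out : List (List Int)) : Decidable (Spec_matrix_vector_mul matrix vector q out) := by unfold Spec_matrix_vector_mul; infer_instance

-- ===== CLAIM (what is proved, stated in full; the proofs are below) =====
def Claim_equal_matrix_vector_mul : Prop := ∀ (matrix : List (List (List Int))) (vector : List (List Int)) (q : Int), Dom_matrix_vector_mul matrix vector q → Pre_matrix_vector_mul matrix vector q → Spec_matrix_vector_mul matrix vector q (matrix_vector_mul matrix vector q)

-- ===== LEMMAS AND PROOFS =====

-- proof-side descriptions of the scatter sums
def pvPairs (n : Nat) : List (Nat × Nat) :=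
  (List.range n).flatMap (fun i => (List.range n).map (fun j => (i, j)))

def pvSC (a b : List Int) (n s : Nat) : Int :=
  (((pvPairs n).filter (fun p => p.1 + p.2 == s)).map
    (fun p => a.getD p.1 0 * b.getD p.2 0)).sum

def pvSA (a b : List Int) (n t : Nat) : Int :=
  (((pvPairs n).filter (fun p => (p.1 + p.2) % n == t)).map
    (fun p => (if n ≤ p.1 + p.2 then (-1 : Int) else 1) * a.getD p.1 0 * b.getD p.2 0)).sum

-- the full-convolution coefficient: sum of a[i]*b[j] over i+j = s (Int-indexed; 0 off-range)
def pvC (a b : List Int) (s : Int) : Int :=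
  ∑ i ∈ Finset.range a.length, ∑ j ∈ Finset.range b.length,
    if (i : Int) + j = s then a.getD i 0 * b.getD j 0 else 0

lemma pv_mod_congr (x y q : Int) (hq : q ≠ 0) (h : q ∣ x - y) :
    PySem.Int.mod x q = PySem.Int.mod y q := by
  obtain ⟨c, hc⟩ := h
  have hx := PySem.Int.floordiv_mul_add_mod x q
  have hy := PySem.Int.floordiv_mul_add_mod y q
  set mx := PySem.Int.mod x q with hmx
  set my := PySem.Int.mod y q with hmy
  set d : Int := c - PySem.Int.floordiv x q + PySem.Int.floordiv y q with hdd
  have hd : mx - my = q * d := by rw [hdd]; linear_combination hc + hx - hy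
  rcases lt_or_gt_of_ne hq with hneg | hpos
  · have b1 := PySem.Int.mod_neg_bounds x hneg
    have b2 := PySem.Int.mod_neg_bounds y hneg
    rw [← hmx] at b1; rw [← hmy] at b2
    have h1 : d < 1 := by nlinarith [b1.1, b1.2, b2.1, b2.2]
    have h2 : -1 < d := by nlinarith [b1.1, b1.2, b2.1, b2.2]
    have h0 : d = 0 := by omega
    rw [h0, mul_zero] at hd; omega
  · have b1l := PySem.Int.mod_nonneg x hpos
    have b1r := PySem.Int.mod_lt x hpos
    have b2l := PySem.Int.mod_nonneg y hpos
    have b2r := PySem.Int.mod_lt y hpos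
    rw [← hmx] at b1l b1r; rw [← hmy] at b2l b2r
    have h1 : d < 1 := by nlinarith
    have h2 : -1 < d := by nlinarith
    have h0 : d = 0 := by omega
    rw [h0, mul_zero] at hd; omega

lemma pv_mod_zero (q : Int) (hq : q ≠ 0) : PySem.Int.mod 0 q = 0 := by
  have hx := PySem.Int.floordiv_mul_add_mod 0 q
  set m := PySem.Int.mod 0 q with hm
  set f := PySem.Int.floordiv 0 q with hf
  rcases lt_or_gt_of_ne hq with hneg | hpos
  · have b1 := PySem.Int.mod_neg_bounds 0 hneg
    rw [← hm] at b1
    have h1 : -f < 1 := by nlinarith [b1.1, b1.2]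
    have h2 : -1 < -f := by nlinarith [b1.1, b1.2]
    have h0 : f = 0 := by omega
    rw [h0] at hx; simpa using hx
  · have b1l := PySem.Int.mod_nonneg 0 hpos
    have b1r := PySem.Int.mod_lt 0 hpos
    rw [← hm] at b1l b1r
    have h1 : -f < 1 := by nlinarith
    have h2 : -1 < -f := by nlinarith
    have h0 : f = 0 := by omega
    rw [h0] at hx; simpa using hx

lemma pv_mod_mod_add (x y q : Int) (hq : q ≠ 0) :
    PySem.Int.mod (PySem.Int.mod x q + y) q = PySem.Int.mod (x + y) q := by
  apply pv_mod_congr _ _ _ hq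
  exact ⟨-PySem.Int.floordiv x q, by linear_combination PySem.Int.floordiv_mul_add_mod x q⟩

lemma pv_mod_add_mod (x y q : Int) (hq : q ≠ 0) :
    PySem.Int.mod (x + PySem.Int.mod y q) q = PySem.Int.mod (x + y) q := by
  apply pv_mod_congr _ _ _ hq
  exact ⟨-PySem.Int.floordiv y q, by linear_combination PySem.Int.floordiv_mul_add_mod y q⟩

lemma pv_getD_set (r : List Int) (p t : Nat) (v : Int) (hp : p < r.length) :
    (r.set p v).getD t 0 = if p = t then v else r.getD t 0 := by
  simp [List.getD_eq_getElem?_getD, List.getElem?_set, hp]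
  split_ifs with h <;> simp

lemma pv_foldl_scatter {ι : Type} (l : List ι) (pos : ι → Nat) (val : ι → Int) :
    ∀ (r : List Int), (∀ x ∈ l, pos x < r.length) →
      (l.foldl (fun r x => r.set (pos x) (r.getD (pos x) 0 + val x)) r).length = r.length ∧
      ∀ t : Nat, (l.foldl (fun r x => r.set (pos x) (r.getD (pos x) 0 + val x)) r).getD t 0
          = r.getD t 0 + ((l.filter (fun x => pos x == t)).map val).sum := by
  induction l with
  | nil => intro r _; simp
  | cons x l ih =>
    intro r hr
    have hx : pos x < r.length := hr x (List.mem_cons_self)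
    have hlen : (r.set (pos x) (r.getD (pos x) 0 + val x)).length = r.length := by simp
    obtain ⟨ihlen, ihget⟩ := ih (r.set (pos x) (r.getD (pos x) 0 + val x))
      (by intro y hy; rw [hlen]; exact hr y (List.mem_cons_of_mem _ hy))
    constructor
    · simpa [hlen] using ihlen
    · intro t
      rw [List.foldl_cons, ihget t, pv_getD_set r (pos x) t _ hx, List.filter_cons]
      by_cases h : pos x = t
      · simp [h]; ring
      · simp [h]

lemma pv_foldl_set_map_aux (f : Int → Int) :
    ∀ (l pre : List Int),
      (List.range' pre.length l.length).foldl (fun r t => r.set t (f (r.getD t 0))) (pre ++ l)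
        = pre ++ l.map f := by
  intro l
  induction l with
  | nil => intro pre; simp
  | cons x l ih =>
    intro pre
    have hget : (pre ++ x :: l).getD pre.length 0 = x := by
      simp [List.getD_eq_getElem?_getD]
    have hset : ∀ v : Int, (pre ++ x :: l).set pre.length v = pre ++ v :: l := by
      intro v
      rw [List.set_append]
      simp
    rw [List.length_cons, List.range'_succ, List.foldl_cons, hget, hset]
    have := ih (pre ++ [f x])
    simpa using this

lemma pv_foldl_set_map (f : Int → Int) (r : List Int) :
    (List.range r.length).foldl (fun r t => r.set t (f (r.getD t 0))) r = r.map f := by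
  have := pv_foldl_set_map_aux f r []
  simpa [List.range_eq_range'] using this

lemma pv_sum_map_sub {α : Type} (l : List α) (g1 g2 : α → Int) :
    (l.map (fun x => g1 x - g2 x)).sum = (l.map g1).sum - (l.map g2).sum := by
  induction l with
  | nil => simp
  | cons x l ih => simp only [List.map_cons, List.sum_cons, ih]; ring

lemma pv_sum_map_add {α : Type} (l : List α) (g1 g2 : α → Int) :
    (l.map (fun x => g1 x + g2 x)).sum = (l.map g1).sum + (l.map g2).sum := by
  induction l with
  | nil => simp
  | cons x l ih => simp only [List.map_cons, List.sum_cons, ih]; ring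

lemma pv_sum_flatMap {α : Type} (l : List α) (f : α → List Int) :
    (l.flatMap f).sum = (l.map (fun x => (f x).sum)).sum := by
  induction l with
  | nil => simp
  | cons x l ih => simp [List.flatMap_cons, ih]

lemma pv_sum_filter {α : Type} (l : List α) (p : α → Bool) (v : α → Int) :
    ((l.filter p).map v).sum = (l.map (fun x => if p x then v x else 0)).sum := by
  induction l with
  | nil => simp
  | cons x l ih => by_cases h : p x <;> simp [h, ih]

lemma pv_mem_pairs {n : Nat} {p : Nat × Nat} (h : p ∈ pvPairs n) : p.1 < n ∧ p.2 < n := by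
  simp only [pvPairs, List.mem_flatMap, List.mem_map, List.mem_range] at h
  obtain ⟨i, hi, j, hj, rfl⟩ := h
  exact ⟨hi, hj⟩

lemma pv_SA_eq_SC (a b : List Int) (n t : Nat) (ht : t < n) :
    pvSA a b n t = pvSC a b n t - (if t + n + 1 < 2 * n then pvSC a b n (t + n) else 0) := by
  unfold pvSA pvSC
  rw [pv_sum_filter, pv_sum_filter, pv_sum_filter]
  by_cases hc : t + n + 1 < 2 * n
  · simp only [hc, if_true]
    rw [← pv_sum_map_sub]
    apply congrArg
    apply List.map_congr_left
    intro p hp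
    obtain ⟨h1, h2⟩ := pv_mem_pairs hp
    by_cases hs : n ≤ p.1 + p.2
    · have hmod : (p.1 + p.2) % n = p.1 + p.2 - n := by
        rw [Nat.mod_eq_sub_mod hs, Nat.mod_eq_of_lt (by omega)]
      have hne : ¬ (p.1 + p.2 = t) := by omega
      by_cases he : p.1 + p.2 = t + n
      · have h3 : (p.1 + p.2) % n = t := by omega
        have htn : t % n = t := Nat.mod_eq_of_lt ht
        have hn0 : ¬ (n = 0) := by omega
        simp [he, htn, hn0]
      · have h3 : ¬ ((p.1 + p.2) % n = t) := by omega
        simp [h3, hne, he]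
    · have hmod : (p.1 + p.2) % n = p.1 + p.2 := Nat.mod_eq_of_lt (by omega)
      have hne : ¬ (p.1 + p.2 = t + n) := by omega
      by_cases he : p.1 + p.2 = t
      · have hn0 : ¬ (n = 0) := by omega
        have htn : t % n = t := Nat.mod_eq_of_lt ht
        simp [he, hn0, htn, Nat.not_le.mpr ht]
      · simp [hmod, he, hne]
  · simp only [hc, if_false, sub_zero]
    apply congrArg
    apply List.map_congr_left
    intro p hp
    obtain ⟨h1, h2⟩ := pv_mem_pairs hp
    by_cases hs : n ≤ p.1 + p.2
    · have hmod : (p.1 + p.2) % n = p.1 + p.2 - n := by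
        rw [Nat.mod_eq_sub_mod hs, Nat.mod_eq_of_lt (by omega)]
      have hne : ¬ ((p.1 + p.2) % n = t) := by omega
      have hne2 : ¬ (p.1 + p.2 = t) := by omega
      simp [hne, hne2]
    · have hmod : (p.1 + p.2) % n = p.1 + p.2 := Nat.mod_eq_of_lt (by omega)
      have htn : t % n = t := Nat.mod_eq_of_lt ht
      by_cases he : p.1 + p.2 = t <;> simp [hmod, he, htn, Nat.not_le.mpr ht]

lemma pv_pyRange_nat (m : Nat) :
    PySem.List.pyRange 0 (m : Int) 1 = List.map (fun (k : Nat) => (k : Int)) (List.range m) := by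
  rw [PySem.List.pyRange_zero, Int.toNat_natCast]

lemma pv_poly_zero (m : Nat) : poly_zero (m : Int) = List.replicate m 0 := by
  rw [poly_zero, pv_pyRange_nat, List.map_map]
  simp [Function.comp_def, List.map_const']

lemma pv_poly_add_eq (a b : List Int) (q : Int) :
    poly_add a b q
      = (List.range a.length).map (fun t => PySem.Int.mod (a.getD t 0 + b.getD t 0) q) := by
  rw [poly_add, PySem.List.len_eq, pv_pyRange_nat, List.foldl_map,
    PySem.List.foldl_append_singleton_eq_map]
  simp only [List.nil_append, PySem.List.pyGetD_natCast]

lemma pv_nested_scatter (n m : Nat) (pos : Nat → Nat → Nat) (val : Nat → Nat → Int) (r : List Int)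
    (hb : ∀ i j, i < n → j < m → pos i j < r.length) :
    ((List.range n).foldl (fun r i => (List.range m).foldl
        (fun r j => r.set (pos i j) (r.getD (pos i j) 0 + val i j)) r) r).length = r.length ∧
    ∀ t, ((List.range n).foldl (fun r i => (List.range m).foldl
        (fun r j => r.set (pos i j) (r.getD (pos i j) 0 + val i j)) r) r).getD t 0
      = r.getD t 0 +
        ((((List.range n).flatMap (fun i => (List.range m).map (fun j => (i, j)))).filter
            (fun p => pos p.1 p.2 == t)).map (fun p => val p.1 p.2)).sum := by
  have heq : ((List.range n).foldl (fun r i => (List.range m).foldl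
        (fun r j => r.set (pos i j) (r.getD (pos i j) 0 + val i j)) r) r)
      = ((List.range n).flatMap (fun i => (List.range m).map (fun j => (i, j)))).foldl
          (fun r p => r.set (pos p.1 p.2) (r.getD (pos p.1 p.2) 0 + val p.1 p.2)) r := by
    rw [List.foldl_flatMap]
    simp only [List.foldl_map]
  rw [heq]
  exact pv_foldl_scatter _ _ _ r (by
    intro p hp
    simp only [List.mem_flatMap, List.mem_map, List.mem_range] at hp
    obtain ⟨i, hi, j, hj, rfl⟩ := hp
    exact hb i j hi hj)

lemma pv_getD_map (f : Int → Int) (l : List Int) (t : Nat) (ht : t < l.length) :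
    (l.map f).getD t 0 = f (l.getD t 0) := by
  rw [List.getD_eq_getElem _ _ (by simpa using ht), List.getD_eq_getElem _ _ ht]
  simp

lemma pv_final_mod (q : Int) (r : List Int) (n : Nat) (h : r.length = n) :
    (List.range n).foldl (fun r t => r.set t (PySem.Int.mod (r.getD t 0) q)) r
      = r.map (fun v => PySem.Int.mod v q) := by
  subst h; exact pv_foldl_set_map (fun v => PySem.Int.mod v q) r

lemma pv_eq_map_range_of_getD (L : List Int) (n : Nat) (f : Nat → Int) (hlen : L.length = n)
    (h : ∀ t, t < n → L.getD t 0 = f t) : L = (List.range n).map f := by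
  refine List.ext_getElem (by simpa) ?_
  intro i h1 h2
  have hi : i < n := by simpa using h2
  have hh := h i hi
  rw [List.getD_eq_getElem _ _ h1] at hh
  simpa [List.getElem_map, List.getElem_range] using hh

lemma pv_poly_mul_eq (a b : List Int) (q : Int) :
    poly_mul a b q
      = (List.range a.length).map (fun t => PySem.Int.mod (pvSA a b a.length t) q) := by
  obtain ⟨hlen, hget⟩ := pv_nested_scatter a.length a.length (fun i j => (i + j) % a.length)
    (fun i j => (if a.length ≤ i + j then (-1 : Int) else 1) * a.getD i 0 * b.getD j 0)
    (List.replicate a.length 0)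
    (by intro i j hi hj; simp only [List.length_replicate]; exact Nat.mod_lt _ (by omega))
  simp only [poly_mul, PySem.List.len_eq, PySem.List.pyRepeat_singleton, Int.toNat_natCast,
    pv_pyRange_nat, List.foldl_map, ← Nat.cast_add, PySem.Int.mod_natCast,
    PySem.List.pySetD_natCast, PySem.List.pyGetD_natCast, ge_iff_le, Nat.cast_le]
  rw [pv_final_mod q _ a.length (by simpa using hlen)]
  refine Eq.trans (congrArg (List.map (fun v => PySem.Int.mod v q))
    (pv_eq_map_range_of_getD _ a.length (fun t => pvSA a b a.length t)
      (by simpa using hlen) ?_)) ?_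
  · intro t ht
    have hS := hget t
    rw [List.getD_replicate _ ht, zero_add] at hS
    unfold pvSA pvPairs
    exact hS
  · simp [List.map_map, Function.comp_def]

lemma pv_idx_add (acc : List Int) (n : Nat) (f : Nat → Int) :
    List.map (fun t => PySem.List.pyGetD acc t 0 + PySem.List.pyGetD ((List.range n).map f) t 0)
      (List.map (fun k : Nat => (k : Int)) (List.range n))
      = (List.range n).map (fun t => acc.getD t 0 + f t) := by
  rw [List.map_map]
  apply List.map_congr_left
  intro t htmem
  have ht : t < n := List.mem_range.mp htmem
  simp only [Function.comp_def, PySem.List.pyGetD_natCast,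
    PySem.List.getD_map_range f n t 0 ht]

-- ----- Karatsuba correctness -----

lemma pv_getD_take (a : List Int) (m i : Nat) (h : i < m) :
    (a.take m).getD i 0 = a.getD i 0 := by
  simp [List.getD_eq_getElem?_getD, h]

lemma pv_getD_drop (a : List Int) (m i : Nat) :
    (a.drop m).getD i 0 = a.getD (m + i) 0 := by
  simp [List.getD_eq_getElem?_getD, List.getElem?_drop]

lemma pvC_eq_zero (a b : List Int) (s : Int)
    (h : s < 0 ∨ (a.length : Int) + b.length - 1 ≤ s) : pvC a b s = 0 := by
  unfold pvC
  refine Finset.sum_eq_zero (fun i hi => Finset.sum_eq_zero (fun j hj => ?_))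
  have hi' := Finset.mem_range.mp hi
  have hj' := Finset.mem_range.mp hj
  have : ¬ ((i : Int) + j = s) := by omega
  simp [this]

lemma pvC_comm (a b : List Int) (s : Int) : pvC a b s = pvC b a s := by
  unfold pvC
  rw [Finset.sum_comm]
  exact Finset.sum_congr rfl (fun j _ => Finset.sum_congr rfl (fun i _ => by
    rw [mul_comm]
    exact if_congr (by omega) rfl rfl))

lemma pvC_split_left (a b : List Int) (m : Nat) (hm : m ≤ a.length) (s : Int) :
    pvC a b s = pvC (a.take m) b s + pvC (a.drop m) b (s - m) := by
  unfold pvC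
  rw [show a.length = m + (a.length - m) from by omega, Finset.sum_range_add]
  congr 1
  · rw [List.length_take, Nat.min_eq_left hm]
    exact Finset.sum_congr rfl (fun i hi => Finset.sum_congr rfl (fun j _ => by
      rw [pv_getD_take a m i (Finset.mem_range.mp hi)]))
  · rw [List.length_drop]
    exact Finset.sum_congr rfl (fun i _ => Finset.sum_congr rfl (fun j _ => by
      rw [pv_getD_drop a m i]
      exact if_congr (by push_cast; omega) rfl rfl))

lemma pvC_split_right (a b : List Int) (m : Nat) (hm : m ≤ b.length) (s : Int) :
    pvC a b s = pvC a (b.take m) s + pvC a (b.drop m) (s - m) := by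
  rw [pvC_comm, pvC_split_left b a m hm s, pvC_comm (b.take m), pvC_comm (b.drop m)]

lemma pvC_sumlist_left (a0 a1 b : List Int) (m n : Nat) (hm0 : a0.length = m)
    (hn : a1.length = n) (hle : m ≤ n) (s : Int) :
    pvC ((List.range n).map (fun t => a1.getD t 0 + if t < m then a0.getD t 0 else 0)) b s
      = pvC a1 b s + pvC a0 b s := by
  subst hn
  unfold pvC
  rw [List.length_map, List.length_range]
  have h1 : ∀ i ∈ Finset.range a1.length, ∀ j ∈ Finset.range b.length,
      (if (i : Int) + j = s then
          ((List.range a1.length).map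
            (fun t => a1.getD t 0 + if t < m then a0.getD t 0 else 0)).getD i 0 * b.getD j 0
        else 0)
      = (if (i : Int) + j = s then a1.getD i 0 * b.getD j 0 else 0)
        + (if (i : Int) + j = s then (if i < m then a0.getD i 0 else 0) * b.getD j 0 else 0) := by
    intro i hi j _
    rw [PySem.List.getD_map_range _ _ _ _ (Finset.mem_range.mp hi)]
    split_ifs <;> ring
  rw [Finset.sum_congr rfl (fun i hi => Finset.sum_congr rfl (fun j hj => h1 i hi j hj))]
  simp only [Finset.sum_add_distrib]
  congr 1
  have h2 : ∑ i ∈ Finset.range a1.length, ∑ j ∈ Finset.range b.length,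
      (if (i : Int) + j = s then (if i < m then a0.getD i 0 else 0) * b.getD j 0 else 0)
      = ∑ i ∈ Finset.range m, ∑ j ∈ Finset.range b.length,
        (if (i : Int) + j = s then (if i < m then a0.getD i 0 else 0) * b.getD j 0 else 0) := by
    symm
    apply Finset.sum_subset
    · intro x hx
      simp only [Finset.mem_range] at hx ⊢
      omega
    intro i _ hni
    have him : ¬ i < m := by simpa using hni
    refine Finset.sum_eq_zero (fun j _ => ?_)
    simp [him]
  rw [h2, hm0]
  exact Finset.sum_congr rfl (fun i hi => Finset.sum_congr rfl (fun j _ => by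
    have : i < m := Finset.mem_range.mp hi
    simp [this]))

lemma pvC_sumlist_right (a b0 b1 : List Int) (m n : Nat) (hm0 : b0.length = m)
    (hn : b1.length = n) (hle : m ≤ n) (s : Int) :
    pvC a ((List.range n).map (fun t => b1.getD t 0 + if t < m then b0.getD t 0 else 0)) s
      = pvC a b1 s + pvC a b0 s := by
  rw [pvC_comm, pvC_sumlist_left b0 b1 a m n hm0 hn hle s, pvC_comm b1, pvC_comm b0]

lemma pv_sum_delta (L s : Nat) (f : Nat → Int) :
    ((List.range L).map (fun t => if t = s then f t else 0)).sum = if s < L then f s else 0 := by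
  induction L with
  | zero => simp
  | succ L ih =>
    rw [List.range_succ, List.map_append, List.sum_append, ih]
    simp only [List.map_cons, List.map_nil, List.sum_cons, List.sum_nil, add_zero]
    by_cases h : L = s
    · subst h; simp
    · rw [if_neg h, add_zero]
      by_cases hs : s < L
      · rw [if_pos hs, if_pos (by omega)]
      · rw [if_neg hs, if_neg (by omega)]

lemma pv_sum_delta_shift (L mm s : Nat) (f : Nat → Int) :
    ((List.range L).map (fun t => if t + mm = s then f t else 0)).sum
      = if mm ≤ s ∧ s - mm < L then f (s - mm) else 0 := by
  by_cases hms : mm ≤ s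
  · have hcong : ∀ t ∈ List.range L, (if t + mm = s then f t else 0)
        = (if t = s - mm then f t else 0) := by
      intro t _
      have : (t + mm = s) ↔ (t = s - mm) := by omega
      simp [this]
    rw [List.map_congr_left hcong, pv_sum_delta]
    by_cases h2 : s - mm < L
    · rw [if_pos h2, if_pos ⟨hms, h2⟩]
    · rw [if_neg h2, if_neg (by omega)]
  · have hcong : ∀ t ∈ List.range L, (if t + mm = s then f t else 0) = 0 := by
      intro t _; rw [if_neg (by omega)]
    rw [List.map_congr_left hcong]
    simp [hms]

lemma pv_scatter1 (L : Nat) (p : Nat → Nat) (v : Nat → Int) (r : List Int)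
    (hb : ∀ t, t < L → p t < r.length) :
    ((List.range L).foldl (fun r t => r.set (p t) (r.getD (p t) 0 + v t)) r).length = r.length ∧
    ∀ s, ((List.range L).foldl (fun r t => r.set (p t) (r.getD (p t) 0 + v t)) r).getD s 0
        = r.getD s 0 + ((List.range L).map (fun t => if p t = s then v t else 0)).sum := by
  obtain ⟨h1, h2⟩ := pv_foldl_scatter (List.range L) p v r
    (fun t ht => hb t (List.mem_range.mp ht))
  refine ⟨h1, fun s => ?_⟩
  rw [h2 s]
  congr 1
  rw [pv_sum_filter]
  apply congrArg
  apply List.map_congr_left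
  intro t _
  by_cases h : p t = s <;> simp [h]

lemma pv_scatter2 (L : Nat) (p1 p2 : Nat → Nat) (v1 v2 : Nat → Int) (r : List Int)
    (hb : ∀ t, t < L → p1 t < r.length ∧ p2 t < r.length) :
    ((List.range L).foldl (fun r t =>
        (r.set (p1 t) (r.getD (p1 t) 0 + v1 t)).set (p2 t)
          ((r.set (p1 t) (r.getD (p1 t) 0 + v1 t)).getD (p2 t) 0 + v2 t)) r).length = r.length ∧
    ∀ s, ((List.range L).foldl (fun r t =>
        (r.set (p1 t) (r.getD (p1 t) 0 + v1 t)).set (p2 t)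
          ((r.set (p1 t) (r.getD (p1 t) 0 + v1 t)).getD (p2 t) 0 + v2 t)) r).getD s 0
        = r.getD s 0 + (((List.range L).map (fun t => if p1 t = s then v1 t else 0)).sum
            + ((List.range L).map (fun t => if p2 t = s then v2 t else 0)).sum) := by
  have heq : ((List.range L).foldl (fun r t =>
        (r.set (p1 t) (r.getD (p1 t) 0 + v1 t)).set (p2 t)
          ((r.set (p1 t) (r.getD (p1 t) 0 + v1 t)).getD (p2 t) 0 + v2 t)) r)
      = (((List.range L).flatMap (fun t => [(p1 t, v1 t), (p2 t, v2 t)])).foldl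
          (fun r p => r.set p.1 (r.getD p.1 0 + p.2)) r) := by
    rw [List.foldl_flatMap]
    rfl
  obtain ⟨h1, h2⟩ := pv_foldl_scatter ((List.range L).flatMap fun t => [(p1 t, v1 t), (p2 t, v2 t)])
    Prod.fst Prod.snd r (by
      intro x hx
      simp only [List.mem_flatMap, List.mem_range, List.mem_cons,
        List.not_mem_nil, or_false] at hx
      obtain ⟨t, ht, hmem⟩ := hx
      rcases hmem with h | h
      · rw [h]; exact (hb t ht).1
      · rw [h]; exact (hb t ht).2)
  constructor
  · rw [heq]; exact h1
  · intro s
    rw [heq, h2 s]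
    congr 1
    rw [pv_sum_filter, List.map_flatMap, pv_sum_flatMap, ← pv_sum_map_add]
    apply congrArg
    apply List.map_congr_left
    intro t _
    simp only [List.map_cons, List.map_nil, List.sum_cons, List.sum_nil, add_zero]
    by_cases hA : p1 t = s <;> by_cases hB : p2 t = s <;> simp [hA, hB]

lemma pv_guard1 (x y : List Int) (mm s : Nat) (hx : x.length = mm) (hy : y.length = mm)
    (h1 : 1 ≤ mm) :
    (if s < 2 * mm - 1 then
        ((List.range (2 * mm - 1)).map (fun t : Nat => pvC x y (t : Int))).getD s 0
      else 0) = pvC x y (s : Int) := by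
  split_ifs with h
  · rw [PySem.List.getD_map_range _ _ _ _ h]
  · symm
    apply pvC_eq_zero
    rw [hx, hy]
    omega

lemma pv_guard_shift (x y : List Int) (mm sh s : Nat) (hx : x.length = mm) (hy : y.length = mm)
    (h1 : 1 ≤ mm) :
    (if sh ≤ s ∧ s - sh < 2 * mm - 1 then
        ((List.range (2 * mm - 1)).map (fun t : Nat => pvC x y (t : Int))).getD (s - sh) 0
      else 0) = pvC x y ((s : Int) - sh) := by
  split_ifs with h
  · rw [PySem.List.getD_map_range _ _ _ _ h.2]
    congr 1
    omega
  · symm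
    apply pvC_eq_zero
    rw [hx, hy]
    omega

lemma pv_neg_ite (c : Prop) [Decidable c] (x : Int) :
    (if c then -x else 0) = -(if c then x else 0) := by
  split_ifs <;> simp


lemma pv_combine (n m : Nat) (Z0 Z1 Z2 : List Int)
    (hm1 : 1 ≤ m) (h2m : 2 * m ≤ n) (hmn : m < n) :
    (List.range (2 * (n - m) - 1)).foldl (fun r t =>
        (r.set (t + m) (r.getD (t + m) 0 + -(Z2.getD t 0))).set (t + 2 * m)
          ((r.set (t + m) (r.getD (t + m) 0 + -(Z2.getD t 0))).getD (t + 2 * m) 0 + Z2.getD t 0))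
      ((List.range (2 * (n - m) - 1)).foldl (fun r t =>
          r.set (t + m) (r.getD (t + m) 0 + Z1.getD t 0))
        ((List.range (2 * m - 1)).foldl (fun r t =>
            (r.set t (r.getD t 0 + Z0.getD t 0)).set (t + m)
              ((r.set t (r.getD t 0 + Z0.getD t 0)).getD (t + m) 0 + -(Z0.getD t 0)))
          (List.replicate (2 * n - 1) 0)))
      = (List.range (2 * n - 1)).map (fun s : Nat =>
          (if s < 2 * m - 1 then Z0.getD s 0 else 0)
          + -(if m ≤ s ∧ s - m < 2 * m - 1 then Z0.getD (s - m) 0 else 0)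
          + (if m ≤ s ∧ s - m < 2 * (n - m) - 1 then Z1.getD (s - m) 0 else 0)
          + -(if m ≤ s ∧ s - m < 2 * (n - m) - 1 then Z2.getD (s - m) 0 else 0)
          + (if 2 * m ≤ s ∧ s - 2 * m < 2 * (n - m) - 1 then Z2.getD (s - 2 * m) 0 else 0)) := by
  obtain ⟨len1, get1⟩ := pv_scatter2 (2 * m - 1) (fun t => t) (fun t => t + m)
    (fun t => Z0.getD t 0) (fun t => -(Z0.getD t 0)) (List.replicate (2 * n - 1) (0 : Int))
    (by intro t ht; simp only [List.length_replicate]; omega)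
  obtain ⟨len2, get2⟩ := pv_scatter1 (2 * (n - m) - 1) (fun t => t + m)
    (fun t => Z1.getD t 0)
    ((List.range (2 * m - 1)).foldl (fun r t =>
        (r.set t (r.getD t 0 + Z0.getD t 0)).set (t + m)
          ((r.set t (r.getD t 0 + Z0.getD t 0)).getD (t + m) 0 + -(Z0.getD t 0)))
      (List.replicate (2 * n - 1) 0))
    (by intro t ht; rw [len1]; simp only [List.length_replicate]; omega)
  obtain ⟨len3, get3⟩ := pv_scatter2 (2 * (n - m) - 1) (fun t => t + m) (fun t => t + 2 * m)
    (fun t => -(Z2.getD t 0)) (fun t => Z2.getD t 0)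
    ((List.range (2 * (n - m) - 1)).foldl (fun r t =>
        r.set (t + m) (r.getD (t + m) 0 + Z1.getD t 0))
      ((List.range (2 * m - 1)).foldl (fun r t =>
          (r.set t (r.getD t 0 + Z0.getD t 0)).set (t + m)
            ((r.set t (r.getD t 0 + Z0.getD t 0)).getD (t + m) 0 + -(Z0.getD t 0)))
        (List.replicate (2 * n - 1) 0)))
    (by intro t ht; rw [len2, len1]; simp only [List.length_replicate]; omega)
  apply pv_eq_map_range_of_getD
  · rw [len3, len2, len1, List.length_replicate]
  · intro s hs
    rw [get3 s, get2 s, get1 s]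
    have hz : (List.replicate (2 * n - 1) (0 : Int)).getD s 0 = 0 := by
      simp [List.getD_eq_getElem?_getD]
    rw [hz]
    simp only [pv_sum_delta, pv_sum_delta_shift]
    simp only [pv_neg_ite]
    ring

lemma conv_kara_eq (N : Nat) : ∀ (a b : List Int), a.length ≤ N → b.length = a.length →
    conv_kara a b = (List.range (2 * a.length - 1)).map (fun s : Nat => pvC a b (s : Int)) := by
  induction N with
  | zero =>
    intro a b hN _
    have h0 : a.length = 0 := by omega
    rw [conv_kara.eq_def, dif_pos h0]
    simp [h0]
  | succ N ih =>
    intro a b hN hb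
    by_cases h0 : a.length = 0
    · rw [conv_kara.eq_def, dif_pos h0]; simp [h0]
    by_cases h1 : a.length = 1
    · rw [conv_kara.eq_def, dif_neg h0, dif_pos h1]
      have hr : List.range (2 * a.length - 1) = [0] := by rw [h1]; decide
      rw [hr]
      simp only [List.map_cons, List.map_nil, Nat.cast_zero]
      unfold pvC
      rw [h1, hb, h1]
      simp
    · have h2 : 2 ≤ a.length := by omega
      rw [conv_kara.eq_def, dif_neg h0, dif_neg h1]
      simp only [sub_eq_add_neg]
      have hmA : a.length / 2 ≤ a.length := Nat.div_le_self _ _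
      have hmB : a.length / 2 ≤ b.length := by omega
      have htA : (List.take (a.length / 2) a).length = a.length / 2 := by
        rw [List.length_take, Nat.min_eq_left hmA]
      have htB : (List.take (a.length / 2) b).length = a.length / 2 := by
        rw [List.length_take, Nat.min_eq_left hmB]
      have hdA : (List.drop (a.length / 2) a).length = a.length - a.length / 2 := by
        rw [List.length_drop]
      have hdB : (List.drop (a.length / 2) b).length = a.length - a.length / 2 := by
        rw [List.length_drop, hb]
      have hz0 : conv_kara (List.take (a.length / 2) a) (List.take (a.length / 2) b)
          = (List.range (2 * (a.length / 2) - 1)).map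
              (fun s : Nat => pvC (List.take (a.length / 2) a) (List.take (a.length / 2) b) (s : Int)) := by
        have h := ih (List.take (a.length / 2) a) (List.take (a.length / 2) b)
          (by rw [htA]; omega) (by rw [htA, htB])
        rwa [htA] at h
      have hz2 : conv_kara (List.drop (a.length / 2) a) (List.drop (a.length / 2) b)
          = (List.range (2 * (a.length - a.length / 2) - 1)).map
              (fun s : Nat => pvC (List.drop (a.length / 2) a) (List.drop (a.length / 2) b) (s : Int)) := by
        have h := ih (List.drop (a.length / 2) a) (List.drop (a.length / 2) b)
          (by rw [hdA]; omega) (by rw [hdA, hdB])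
        rwa [hdA] at h
      have hsA : ((List.range (a.length - a.length / 2)).map
          (fun t => (List.drop (a.length / 2) a).getD t 0 +
            if t < a.length / 2 then (List.take (a.length / 2) a).getD t 0 else 0)).length
          = a.length - a.length / 2 := by simp
      have hsB : ((List.range (a.length - a.length / 2)).map
          (fun t => (List.drop (a.length / 2) b).getD t 0 +
            if t < a.length / 2 then (List.take (a.length / 2) b).getD t 0 else 0)).length
          = a.length - a.length / 2 := by simp
      have hz1 : conv_kara
            ((List.range (a.length - a.length / 2)).map
              (fun t => (List.drop (a.length / 2) a).getD t 0 +
                if t < a.length / 2 then (List.take (a.length / 2) a).getD t 0 else 0))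
            ((List.range (a.length - a.length / 2)).map
              (fun t => (List.drop (a.length / 2) b).getD t 0 +
                if t < a.length / 2 then (List.take (a.length / 2) b).getD t 0 else 0))
          = (List.range (2 * (a.length - a.length / 2) - 1)).map
              (fun s : Nat => pvC
                ((List.range (a.length - a.length / 2)).map
                  (fun t => (List.drop (a.length / 2) a).getD t 0 +
                    if t < a.length / 2 then (List.take (a.length / 2) a).getD t 0 else 0))
                ((List.range (a.length - a.length / 2)).map
                  (fun t => (List.drop (a.length / 2) b).getD t 0 +
                    if t < a.length / 2 then (List.take (a.length / 2) b).getD t 0 else 0)) (s : Int)) := by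
        have h := ih
          ((List.range (a.length - a.length / 2)).map
            (fun t => (List.drop (a.length / 2) a).getD t 0 +
              if t < a.length / 2 then (List.take (a.length / 2) a).getD t 0 else 0))
          ((List.range (a.length - a.length / 2)).map
            (fun t => (List.drop (a.length / 2) b).getD t 0 +
              if t < a.length / 2 then (List.take (a.length / 2) b).getD t 0 else 0))
          (by rw [hsA]; omega) (by rw [hsA, hsB])
        rwa [hsA] at h
      rw [hz0, hz1, hz2]
      simp only [List.length_map, List.length_range]
      rw [pv_combine a.length (a.length / 2) _ _ _ (by omega) (by omega) (by omega)]
      apply List.map_congr_left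
      intro s hsmem
      have hs : s < 2 * a.length - 1 := List.mem_range.mp hsmem
      rw [pv_guard1 _ _ (a.length / 2) s htA htB (by omega),
        pv_guard_shift _ _ (a.length / 2) (a.length / 2) s htA htB (by omega),
        pv_guard_shift _ _ (a.length - a.length / 2) (a.length / 2) s hsA hsB (by omega),
        pv_guard_shift _ _ (a.length - a.length / 2) (a.length / 2) s hdA hdB (by omega),
        pv_guard_shift _ _ (a.length - a.length / 2) (2 * (a.length / 2)) s hdA hdB (by omega)]
      have hsplit1 := pvC_split_left a b (a.length / 2) hmA (s : Int)
      have hsplit2 := pvC_split_right (List.take (a.length / 2) a) b (a.length / 2) hmB (s : Int)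
      have hsplit3 := pvC_split_right (List.drop (a.length / 2) a) b (a.length / 2) hmB
        ((s : Int) - (a.length / 2 : Nat))
      have hx1 := pvC_sumlist_left (List.take (a.length / 2) a) (List.drop (a.length / 2) a)
        ((List.range (a.length - a.length / 2)).map
          (fun t => (List.drop (a.length / 2) b).getD t 0 +
            if t < a.length / 2 then (List.take (a.length / 2) b).getD t 0 else 0))
        (a.length / 2) (a.length - a.length / 2) htA hdA (by omega)
        ((s : Int) - (a.length / 2 : Nat))
      have hx2 := pvC_sumlist_right (List.drop (a.length / 2) a)
        (List.take (a.length / 2) b) (List.drop (a.length / 2) b)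
        (a.length / 2) (a.length - a.length / 2) htB hdB (by omega)
        ((s : Int) - (a.length / 2 : Nat))
      have hx3 := pvC_sumlist_right (List.take (a.length / 2) a)
        (List.take (a.length / 2) b) (List.drop (a.length / 2) b)
        (a.length / 2) (a.length - a.length / 2) htB hdB (by omega)
        ((s : Int) - (a.length / 2 : Nat))
      have hcast1 : pvC (List.drop (a.length / 2) a) (List.drop (a.length / 2) b)
            ((s : Int) - ((2 * (a.length / 2) : Nat) : Int))
          = pvC (List.drop (a.length / 2) a) (List.drop (a.length / 2) b)
            ((s : Int) - (a.length / 2 : Nat) - (a.length / 2 : Nat)) := by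
        congr 1
        push_cast
        ring
      linarith [hsplit1, hsplit2, hsplit3, hx1, hx2, hx3, hcast1]

lemma pv_list_sum_range (n : Nat) (f : Nat → Int) :
    ((List.range n).map f).sum = ∑ i ∈ Finset.range n, f i := rfl

lemma pvSC_eq_pvC (a b : List Int) (n : Nat) (ha : a.length = n) (hbl : b.length = n) (s : Nat) :
    pvSC a b n s = pvC a b (s : Int) := by
  unfold pvSC pvPairs pvC
  rw [pv_sum_filter, List.map_flatMap, pv_sum_flatMap]
  simp only [List.map_map, Function.comp_def]
  rw [ha, hbl, pv_list_sum_range]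
  exact Finset.sum_congr rfl (fun i _ => by
    rw [pv_list_sum_range]
    exact Finset.sum_congr rfl (fun j _ => if_congr (by simp [beq_iff_eq]; omega) rfl rfl))

lemma pv_kara_mul_eq (a b : List Int) (n : Nat) (ha : a.length = n) (hbl : b.length = n) :
    poly_mul_kara a b (n : Int) = (List.range n).map (fun t => pvSA a b n t) := by
  simp only [poly_mul_kara]
  have hc : conv_kara a b = (List.range (2 * n - 1)).map (fun s : Nat => pvC a b (s : Int)) := by
    have := conv_kara_eq a.length a b le_rfl (by omega)
    rwa [ha] at this
  rw [hc, pv_pyRange_nat, List.map_map]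
  apply List.map_congr_left
  intro t htmem
  have ht : t < n := List.mem_range.mp htmem
  simp only [Function.comp_def, ← Nat.cast_add, PySem.List.pyGetD_natCast]
  rw [pv_SA_eq_SC a b n t ht]
  have hcond : (((t + n : Nat) : Int) < 2 * (n : Int) - 1) ↔ (t + n + 1 < 2 * n) := by
    push_cast; omega
  rw [pvSC_eq_pvC a b n ha hbl t, pvSC_eq_pvC a b n ha hbl (t + n)]
  by_cases hcase : t + n + 1 < 2 * n
  · rw [if_pos (hcond.mpr hcase), if_pos hcase,
      PySem.List.getD_map_range _ _ _ _ (show t < 2 * n - 1 by omega),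
      PySem.List.getD_map_range _ _ _ _ (show t + n < 2 * n - 1 by omega)]
  · rw [if_neg (fun hh => hcase (hcond.mp hh)), if_neg hcase,
      PySem.List.getD_map_range _ _ _ _ (show t < 2 * n - 1 by omega)]

lemma pv_fold_congr_acc (n : Nat) (js : List Nat) (f g : List Int → Nat → List Int)
    (hlen : ∀ acc j, j ∈ js → acc.length = n → (g acc j).length = n)
    (hfg : ∀ acc j, j ∈ js → acc.length = n → f acc j = g acc j) :
    ∀ acc : List Int, acc.length = n → js.foldl f acc = js.foldl g acc := by
  induction js with
  | nil => intro acc _; rfl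
  | cons j js ih =>
    intro acc hacc
    rw [List.foldl_cons, List.foldl_cons, hfg acc j List.mem_cons_self hacc]
    exact ih (fun acc j hj => hlen acc j (List.mem_cons_of_mem _ hj))
      (fun acc j hj => hfg acc j (List.mem_cons_of_mem _ hj))
      (g acc j) (hlen acc j List.mem_cons_self hacc)

lemma pv_row_inv (q : Int) (hq : q ≠ 0) (n : Nat) (mat vec : Nat → List Int) :
    ∀ (js : List Nat), (∀ j ∈ js, (mat j).length = n) →
    ∀ (acc : List Int), acc.length = n →
      js.foldl (fun acc j => poly_add acc (poly_mul (mat j) (vec j) q) q)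
          (acc.map (fun c => PySem.Int.mod c q))
        = (js.foldl (fun acc j => (List.range n).map
              (fun t => acc.getD t 0 + pvSA (mat j) (vec j) n t)) acc).map
            (fun c => PySem.Int.mod c q) := by
  intro js
  induction js with
  | nil => intro _ acc _; rfl
  | cons j js ih =>
    intro hA acc hacc
    have hAj : (mat j).length = n := hA j List.mem_cons_self
    rw [List.foldl_cons, List.foldl_cons]
    have hstep : poly_add (acc.map (fun c => PySem.Int.mod c q)) (poly_mul (mat j) (vec j) q) q
        = ((List.range n).map (fun t => acc.getD t 0 + pvSA (mat j) (vec j) n t)).map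
            (fun c => PySem.Int.mod c q) := by
      rw [pv_poly_add_eq, pv_poly_mul_eq]
      have hlen1 : (acc.map (fun c => PySem.Int.mod c q)).length = n := by simpa using hacc
      rw [hlen1, List.map_map]
      apply List.map_congr_left
      intro t htmem
      have ht : t < n := List.mem_range.mp htmem
      rw [pv_getD_map _ acc t (by omega)]
      rw [hAj]
      rw [PySem.List.getD_map_range _ _ _ _ ht]
      rw [pv_mod_mod_add _ _ q hq, pv_mod_add_mod _ _ q hq]
      rfl
    rw [hstep]
    exact ih (fun j hj => hA j (List.mem_cons_of_mem _ hj)) _ (by simp)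

-- ===== VERDICT (by name: the statement is the Claim_ definition above) =====
theorem matrix_vector_mul_spec : Claim_equal_matrix_vector_mul := by
  intro matrix vector q _ hPre
  obtain ⟨hq, hv, hmlen, hvlen, hmat⟩ := hPre
  unfold Spec_matrix_vector_mul
  have hn0 : PySem.List.pyGetD vector 0 [] = vector.headD [] := by
    cases vector with
    | nil => exact absurd rfl hv
    | cons v vs => simp [PySem.List.pyGetD_zero_cons]
  set n := (vector.headD []).length with hnn
  set k := vector.length with hkk
  have hmat' : ∀ i j : Nat, i < k → j < k →
      (PySem.List.pyGetD (PySem.List.pyGetD matrix (i : Int) []) (j : Int) []).length = n := by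
    intro i j hi hj
    rw [PySem.List.pyGetD_natCast, PySem.List.pyGetD_natCast]
    have hi' : i < matrix.length := lt_of_lt_of_le hi hmlen
    rw [List.getD_eq_getElem _ _ hi']
    have hrow : matrix[i] ∈ matrix.take k := by
      have hlt : i < (List.take k matrix).length := by simp [hi']; omega
      have heq : (List.take k matrix)[i]'hlt = matrix[i] := List.getElem_take
      rw [← heq]; exact List.getElem_mem _
    obtain ⟨hrl, hre⟩ := hmat _ hrow
    have hj' : j < matrix[i].length := by omega
    rw [List.getD_eq_getElem _ _ hj']
    have hent : matrix[i][j] ∈ matrix[i].take k := by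
      have hlt : j < (List.take k matrix[i]).length := by simp; omega
      have heq : (List.take k matrix[i])[j]'hlt = matrix[i][j] := List.getElem_take
      rw [← heq]; exact List.getElem_mem _
    exact hre _ hent
  have hvec' : ∀ j : Nat, j < k → (PySem.List.pyGetD vector (j : Int) []).length = n := by
    intro j hj
    rw [PySem.List.pyGetD_natCast, List.getD_eq_getElem _ _ hj]
    exact hvlen _ (List.getElem_mem _)
  simp only [matrix_vector_mul, matrix_vector_mul_alt, hn0, PySem.List.len_eq, ← hnn, ← hkk,
    pv_poly_zero, PySem.List.pyRepeat_singleton, Int.toNat_natCast,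
    pv_pyRange_nat, List.foldl_map, PySem.List.foldl_append_singleton_eq_map, List.nil_append]
  apply List.map_congr_left
  intro i hi
  have hik : i < k := List.mem_range.mp hi
  have hrepl : (List.replicate n (0 : Int)).map (fun c => PySem.Int.mod c q)
      = List.replicate n 0 := by
    simp [List.map_replicate, pv_mod_zero q hq]
  have hA := pv_row_inv q hq n
    (fun j => PySem.List.pyGetD (PySem.List.pyGetD matrix (i : Int) []) (j : Int) [])
    (fun j => PySem.List.pyGetD vector (j : Int) [])
    (List.range k)
    (fun j hj => hmat' i j hik (List.mem_range.mp hj))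
    (List.replicate n 0) (by simp)
  have hB := pv_fold_congr_acc n (List.range k)
    (fun acc (j : Nat) => List.map (fun t => PySem.List.pyGetD acc t 0 +
        PySem.List.pyGetD (poly_mul_kara
          (PySem.List.pyGetD (PySem.List.pyGetD matrix (i : Int) []) (j : Int) [])
          (PySem.List.pyGetD vector (j : Int) []) (n : Int)) t 0)
      (List.map (fun k : Nat => (k : Int)) (List.range n)))
    (fun acc j => (List.range n).map (fun t => acc.getD t 0 +
        pvSA (PySem.List.pyGetD (PySem.List.pyGetD matrix (i : Int) []) (j : Int) [])
          (PySem.List.pyGetD vector (j : Int) []) n t))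
    (fun acc j _ _ => by simp)
    (fun acc j hj _ => by
      have hjk : j < k := List.mem_range.mp hj
      simp only [pv_kara_mul_eq _ _ n (hmat' i j hik hjk) (hvec' j hjk)]
      exact pv_idx_add acc n _)
    (List.replicate n 0) (by simp)
  exact (congrArg (fun z => List.foldl (fun (acc : List Int) (j : Nat) =>
      poly_add acc (poly_mul (PySem.List.pyGetD (PySem.List.pyGetD matrix (i : Int) []) (j : Int) [])
        (PySem.List.pyGetD vector (j : Int) []) q) q) z (List.range k)) hrepl.symm).trans
    (hA.trans (congrArg (List.map (fun c => PySem.Int.mod c q)) hB.symm))
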